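-- pv_equiv track=rewrite | github.com/feiyu7348/Algorithm-exercise | python/数组/移除元素.py | removeElement1
-- ===== SOURCE A (Python) =====
-- def removeElement1(nums, val):
--     # 正向双指针法, 慢指针指向新数组的末尾，快指针遍历整个数组
--     n = len(nums)
--     slow = 0
--     fast = 0
--
--     while fast < n:
--         if nums[fast] != val:
--             nums[slow] = nums[fast]
--             slow += 1
--
--         fast += 1
--
--     return slow
-- ===== SOURCE B (Python) =====
-- def removeElement1(nums, val):
--     # build kept elements, then write them back over the front in one slice assignment
--     filtered = [x for x in nums if x != val]
--     nums[:len(filtered)] = filtered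
--     return len(filtered)
-- ===== Notes on version B (the rewrite author's own statement) =====
-- stated objective: simpler
-- what changed: Replaces the in-place two-pointer compaction loop with a build-then-writeback two-pass: materialize the kept elements with a comprehension, slice-assign them over the front, and return their length.
import Mathlib
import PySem

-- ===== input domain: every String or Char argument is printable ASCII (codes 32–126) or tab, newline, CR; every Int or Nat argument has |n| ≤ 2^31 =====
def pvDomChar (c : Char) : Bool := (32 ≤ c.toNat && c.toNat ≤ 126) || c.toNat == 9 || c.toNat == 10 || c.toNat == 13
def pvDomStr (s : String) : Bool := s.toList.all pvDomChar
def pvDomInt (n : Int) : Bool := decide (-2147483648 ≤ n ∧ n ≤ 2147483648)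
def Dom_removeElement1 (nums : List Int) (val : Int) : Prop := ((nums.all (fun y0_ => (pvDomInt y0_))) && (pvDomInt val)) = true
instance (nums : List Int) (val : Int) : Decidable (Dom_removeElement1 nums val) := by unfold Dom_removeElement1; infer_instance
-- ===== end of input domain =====

-- B replaces A's single compacting two-pointer pass by a build-then-writeback two-pass
-- (filter comprehension + slice assignment); equivalence here is about the RETURN value
-- (both mutate nums identically: the kept elements overwrite the front, tail untouched).

-- ===== PORT A =====
-- A's while loop: state is the (mutated) list, slow, fast; fuel = n - fast iterations remain.
-- Indices slow and fast are always in range, so getD 0 is exact here.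
def removeElement1Loop (val : Int) : Nat → List Int → Nat → Nat → Nat
  | 0, _, slow, _ => slow
  | fuel + 1, ns, slow, fast =>
      if ns.getD fast 0 ≠ val then
        removeElement1Loop val fuel (ns.set slow (ns.getD fast 0)) (slow + 1) (fast + 1)
      else
        removeElement1Loop val fuel ns slow (fast + 1)

def removeElement1 (nums : List Int) (val : Int) : Int :=
  (removeElement1Loop val nums.length nums 0 0 : Int)

-- ===== PORT B =====
def removeElement1_alt (nums : List Int) (val : Int) : Int :=
  -- filtered = [x for x in nums if x != val]; return len(filtered)
  let filtered := nums.filter (fun x => x ≠ val)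
  (filtered.length : Int)

-- ===== PRECONDITION & SPEC =====
def Spec_removeElement1 (nums : List Int) (val : Int) (out : Int) : Prop := out = removeElement1_alt nums val
instance (nums : List Int) (val : Int) (out : Int) : Decidable (Spec_removeElement1 nums val out) := by unfold Spec_removeElement1; infer_instance

-- ===== CLAIM (what is proved, stated in full; the proofs are below) =====
def Claim_equal_removeElement1 : Prop := ∀ (nums : List Int) (val : Int), Dom_removeElement1 nums val → Spec_removeElement1 nums val (removeElement1 nums val)

-- ===== LEMMAS AND PROOFS =====

-- Loop invariant: if the suffix of ns from index `fast` is `tl`, fuel = tl.length and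
-- slow ≤ fast, the loop returns slow plus the number of kept elements in tl.
theorem removeElement1Loop_eq (val : Int) :
    ∀ (tl : List Int) (ns : List Int) (slow fast : Nat),
      ns.drop fast = tl → slow ≤ fast →
      removeElement1Loop val tl.length ns slow fast =
        slow + (tl.filter (fun x => x ≠ val)).length := by
  intro tl
  induction tl with
  | nil => intro ns slow fast _ _; simp [removeElement1Loop]
  | cons x rest ih =>
      intro ns slow fast hdrop hle
      have hget : ns.getD fast 0 = x := by
        have h1 : ns[fast]? = some x := by
          have := List.getElem?_drop (xs := ns) (i := fast) (j := 0)
          simp [hdrop] at this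
          simpa using this.symm
        simp [List.getD, h1]
      have hdrop1 : ns.drop (fast + 1) = rest := by
        have := congrArg (List.drop 1) hdrop
        simpa [List.drop_drop, Nat.add_comm] using this
      simp only [List.length_cons, removeElement1Loop, hget]
      by_cases hx : x = val
      · simp only [hx, ne_eq, not_true_eq_false, if_false]
        rw [ih ns slow (fast + 1) hdrop1 (by omega)]
        simp [List.filter]
      · simp only [ne_eq, hx, not_false_eq_true, if_true]
        have hdrop' : (ns.set slow x).drop (fast + 1) = rest := by
          rw [List.drop_set, if_pos (by omega)]
          exact hdrop1
        rw [ih (ns.set slow x) (slow + 1) (fast + 1) hdrop' (by omega)]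
        simp [List.filter, hx]
        omega

theorem removeElement1_eq_alt (nums : List Int) (val : Int) :
    removeElement1 nums val = removeElement1_alt nums val := by
  unfold removeElement1 removeElement1_alt
  have h := removeElement1Loop_eq val nums nums 0 0 (by simp) (Nat.le_refl 0)
  simp at h
  rw [h]
  simp [ne_eq]

-- ===== VERDICT (by name: the statement is the Claim_ definition above) =====
theorem removeElement1_spec : Claim_equal_removeElement1 := by
  intro nums val _
  unfold Spec_removeElement1
  exact removeElement1_eq_alt nums val
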